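-- pv_equiv track=rewrite | github.com/wheresbarney/AdventOfCode2024 | day21/day21.py | directional
-- ===== SOURCE A (Python) =====
-- DIRECTIONAL_BUTTONS = {"^": (1, 0), "A": (2, 0), "<": (0, 1), "v": (1, 1), ">": (2, 1)}
--
-- def directional(code):
--     out = []
--     current = DIRECTIONAL_BUTTONS["A"]
--
--     for c in code:
--         next = DIRECTIONAL_BUTTONS[c]
--         out.append(nextDirectional(current, next))
--         current = next
--     return "".join(out)
--
-- def nextDirectional(current, next):
--     out = []
--     # always do downs before lefts, rights before ups, then we avoid the blank space
--     out += [">"] * max(0, next[0] - current[0])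
--     out += ["^"] * max(0, current[1] - next[1])
--     out += ["v"] * max(0, next[1] - current[1])
--     out += ["<"] * max(0, current[0] - next[0])
--     out.append("A")
--
--     return "".join(out)
-- ===== SOURCE B (Python) =====
-- # Table-driven: every ordered pair of directional buttons maps to its literal
-- # move string (downs before lefts, rights before ups, then 'A'), so the per-pair
-- # coordinate arithmetic disappears entirely.
-- MOVES = {
--     ('^', '^'): 'A',   ('^', 'A'): '>A',   ('^', '<'): 'v<A',  ('^', 'v'): 'vA',  ('^', '>'): '>vA',
--     ('A', '^'): '<A',  ('A', 'A'): 'A',    ('A', '<'): 'v<<A', ('A', 'v'): 'v<A', ('A', '>'): 'vA',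
--     ('<', '^'): '>^A', ('<', 'A'): '>>^A', ('<', '<'): 'A',    ('<', 'v'): '>A',  ('<', '>'): '>>A',
--     ('v', '^'): '^A',  ('v', 'A'): '>^A',  ('v', '<'): '<A',   ('v', 'v'): 'A',   ('v', '>'): '>A',
--     ('>', '^'): '^<A', ('>', 'A'): '^A',   ('>', '<'): '<<A',  ('>', 'v'): '<A',  ('>', '>'): 'A',
-- }
--
-- def directional(code):
--     return "".join(MOVES[p] for p in zip('A' + code, code))
-- ===== Notes on version B (the rewrite author's own statement) =====
-- stated objective: alternative
-- what changed: B replaces the coordinate lookup plus per-step delta arithmetic (nextDirectional) by a precomputed 25-entry transition table mapping each ordered pair of buttons directly to its literal move string, applied over adjacent pairs of 'A'+code.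
import Mathlib
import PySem

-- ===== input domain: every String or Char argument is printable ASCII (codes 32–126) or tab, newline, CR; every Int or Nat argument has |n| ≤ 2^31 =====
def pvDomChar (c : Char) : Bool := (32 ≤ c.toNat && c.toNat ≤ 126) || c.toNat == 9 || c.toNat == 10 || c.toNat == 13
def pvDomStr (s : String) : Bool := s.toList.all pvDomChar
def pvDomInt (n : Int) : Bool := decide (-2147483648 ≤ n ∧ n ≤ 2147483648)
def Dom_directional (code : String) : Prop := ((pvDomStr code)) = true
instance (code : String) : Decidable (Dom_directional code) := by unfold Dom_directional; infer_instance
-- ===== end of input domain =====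

-- B replaces A's coordinate lookup + per-step delta arithmetic by a precomputed
-- 25-entry pair→move-string transition table applied over adjacent button pairs.

-- ===== PORT A =====
def dirButtons : PySem.Dict Char (Int × Int) :=
  PySem.Dict.ofList [('^', (1, 0)), ('A', (2, 0)), ('<', (0, 1)), ('v', (1, 1)), ('>', (2, 1))]

def dirBtn (c : Char) : Int × Int := PySem.Dict.getD dirButtons c (0, 0)

-- exact port of nextDirectional (list-append of replicated move characters, then 'A')
def nextDirectional (current next : Int × Int) : String :=
  String.ofList (List.replicate (max 0 (next.1 - current.1)).toNat '>'
    ++ List.replicate (max 0 (current.2 - next.2)).toNat '^'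
    ++ List.replicate (max 0 (next.2 - current.2)).toNat 'v'
    ++ List.replicate (max 0 (current.1 - next.1)).toNat '<'
    ++ ['A'])

def directional (code : String) : String :=
  let r := code.toList.foldl
    (fun (st : List String × (Int × Int)) c =>
      let next := dirBtn c
      (st.1 ++ [nextDirectional st.2 next], next))
    ([], dirBtn 'A')
  String.join r.1

-- ===== PORT B =====
-- Source B's MOVES: literal transition table over ordered button pairs
def movesTable : PySem.Dict (Char × Char) String :=
  PySem.Dict.ofList
    [ (('^','^'), "A"),  (('^','A'), ">A"),   (('^','<'), "v<A"),  (('^','v'), "vA"),  (('^','>'), ">vA"),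
      (('A','^'), "<A"), (('A','A'), "A"),    (('A','<'), "v<<A"), (('A','v'), "v<A"), (('A','>'), "vA"),
      (('<','^'), ">^A"),(('<','A'), ">>^A"), (('<','<'), "A"),    (('<','v'), ">A"),  (('<','>'), ">>A"),
      (('v','^'), "^A"), (('v','A'), ">^A"),  (('v','<'), "<A"),   (('v','v'), "A"),   (('v','>'), ">A"),
      (('>','^'), "^<A"),(('>','A'), "^A"),   (('>','<'), "<<A"),  (('>','v'), "<A"),  (('>','>'), "A") ]

def directional_alt (code : String) : String :=
  let cs := code.toList
  String.join (((( 'A' :: cs).zip cs).map (fun p => PySem.Dict.getD movesTable p "")))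

-- ===== PRECONDITION & SPEC =====
-- A raises KeyError on any character outside the five directional-keypad buttons; Pre_ excludes those codes.
def Pre_directional (code : String) : Prop :=
  (code.toList.all (fun c => c == '^' || c == 'A' || c == '<' || c == 'v' || c == '>')) = true
instance (code : String) : Decidable (Pre_directional code) := by unfold Pre_directional; infer_instance

def pvWitness_directional : String := "A"

def Spec_directional (code : String) (out : String) : Prop := out = directional_alt code
instance (code : String) (out : String) : Decidable (Spec_directional code out) := by unfold Spec_directional; infer_instance

-- ===== CLAIM =====
def Claim_equal_directional : Prop := ∀ (code : String), Dom_directional code → Pre_directional code → Spec_directional code (directional code)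

-- ===== LEMMAS AND PROOFS =====
def validBtn (c : Char) : Prop := c = '^' ∨ c = 'A' ∨ c = '<' ∨ c = 'v' ∨ c = '>'

-- A's arithmetic helper agrees with B's table on every valid pair (25 kernel checks)
lemma pair_eq {a b : Char} (ha : validBtn a) (hb : validBtn b) :
    nextDirectional (dirBtn a) (dirBtn b) = PySem.Dict.getD movesTable (a, b) "" := by
  rcases ha with h|h|h|h|h <;> subst h <;> rcases hb with h|h|h|h|h <;> subst h <;> decide

lemma fold_eq_zip : ∀ (cs : List Char), (∀ c ∈ cs, validBtn c) →
    ∀ (acc : List String) (prev : Char), validBtn prev →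
    (cs.foldl
      (fun (st : List String × (Int × Int)) c =>
        (st.1 ++ [nextDirectional st.2 (dirBtn c)], dirBtn c))
      (acc, dirBtn prev)).1
    = acc ++ ((prev :: cs).zip cs).map (fun p => PySem.Dict.getD movesTable p "") := by
  intro cs
  induction cs with
  | nil => intro _ acc prev _; simp
  | cons c cs ih =>
    intro hv acc prev hp
    have hc : validBtn c := hv c (by simp)
    simp only [List.foldl_cons, List.zip_cons_cons, List.map_cons]
    rw [pair_eq hp hc, ih (fun x hx => hv x (by simp [hx])) _ c hc]
    simp

lemma all_valid {code : String} (h : Pre_directional code) : ∀ c ∈ code.toList, validBtn c := by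
  intro c hc
  have := List.all_eq_true.mp h c hc
  simp only [validBtn]
  revert this
  simp only [Bool.or_eq_true, beq_iff_eq]
  tauto

-- ===== VERDICT =====
theorem directional_spec : Claim_equal_directional := by
  intro code _ hpre
  show directional code = directional_alt code
  simp only [directional, directional_alt]
  rw [fold_eq_zip code.toList (all_valid hpre) [] 'A' (by right; left; rfl)]
  simp
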